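-- pv_equiv track=rewrite | github.com/floh0/advent-of-code-2020 | day12.py | mpart2
-- ===== SOURCE A (Python) =====
-- def mpart2(w,m,d,v):
-- 	if d in w:
-- 		w[d] += v
-- 	elif d == "R":
-- 		for _ in range((v//90)%4):
-- 			w["N"],w["S"],w["E"],w["W"]=w["W"],w["E"],w["N"],w["S"]
-- 	elif d == "L":
-- 		for _ in range((v//90)%4):
-- 			w["N"],w["S"],w["E"],w["W"]=w["E"],w["W"],w["S"],w["N"]
-- 	elif d == "F":
-- 		for _ in range(v):
-- 			m["N"] += w["N"]
-- 			m["S"] += w["S"]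
-- 			m["E"] += w["E"]
-- 			m["W"] += w["W"]
-- 	return m,w
-- ===== SOURCE B (Python) =====
-- def mpart2(w, m, d, v):
--     if d in w:
--         w[d] += v
--     elif d in ("R", "L"):
--         k = (v // 90) % 4
--         if d == "L":
--             k = -k % 4
--         order = ("N", "E", "S", "W")
--         vals = [w[o] for o in order]
--         for i, o in enumerate(order):
--             w[o] = vals[(i - k) % 4]
--     elif d == "F":
--         for o in ("N", "S", "E", "W"):
--             m[o] += w[o] * v
--     return m, w
-- ===== Notes on version B (the rewrite author's own statement) =====
-- stated objective: alternative
-- what changed: B replaces A's repeated-addition forward loop (v iterations of m[k]+=w[k]) by a single multiplication m[k]+=w[k]*v, and A's per-90-degree swap loop by one table-driven permutation write computed from (v//90)%4; …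
-- outside the precondition, e.g. on mpart2({}, {}, 'R', 0): A returns ({}, {}), B raises KeyError
import Mathlib
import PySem

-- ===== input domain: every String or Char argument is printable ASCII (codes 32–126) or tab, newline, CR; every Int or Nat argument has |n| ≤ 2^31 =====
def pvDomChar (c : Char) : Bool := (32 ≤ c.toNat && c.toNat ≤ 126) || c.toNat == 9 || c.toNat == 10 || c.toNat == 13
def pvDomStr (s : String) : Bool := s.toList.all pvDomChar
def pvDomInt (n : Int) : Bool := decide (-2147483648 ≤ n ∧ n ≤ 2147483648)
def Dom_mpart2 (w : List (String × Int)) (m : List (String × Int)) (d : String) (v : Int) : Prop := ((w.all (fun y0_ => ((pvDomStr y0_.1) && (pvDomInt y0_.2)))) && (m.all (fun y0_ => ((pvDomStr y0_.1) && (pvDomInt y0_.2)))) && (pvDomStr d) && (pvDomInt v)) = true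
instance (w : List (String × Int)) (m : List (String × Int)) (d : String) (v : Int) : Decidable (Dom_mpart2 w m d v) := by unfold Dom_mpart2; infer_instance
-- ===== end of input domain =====

-- B replaces A's repeated-addition F-loop by a single multiplication per key and A's repeated
-- key-swap rotation loop by one table-driven permutation write (objective: alternative).
-- Both Pythons mutate w/m in place exactly alike; the equivalence proved is about the return value.

-- ===== PORT A =====
-- Literal port of A.  Python dicts are PySem.Dict over the association lists; a read w["N"]/m["N"]
-- of a missing key raises KeyError in Python — here it is `getD _ 0`, and Pre_mpart2 excludes
-- exactly those inputs, so the default is never what the claim is about.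
def mpart2 (w : List (String × Int)) (m : List (String × Int)) (d : String) (v : Int) :
    (List (String × Int)) × (List (String × Int)) :=
  if (PySem.Dict.mk w).contains d then
    (m, ((PySem.Dict.mk w).insert d ((PySem.Dict.mk w).getD d 0 + v)).items)
  else if d == "R" then
    (m, ((List.range (PySem.Int.mod (PySem.Int.floordiv v 90) 4).toNat).foldl
      (fun Wc _ =>
        -- tuple assignment: all four reads happen before the four writes
        let a := Wc.getD "W" 0
        let b := Wc.getD "E" 0
        let c := Wc.getD "N" 0
        let e := Wc.getD "S" 0
        (((Wc.insert "N" a).insert "S" b).insert "E" c).insert "W" e)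
      (PySem.Dict.mk w)).items)
  else if d == "L" then
    (m, ((List.range (PySem.Int.mod (PySem.Int.floordiv v 90) 4).toNat).foldl
      (fun Wc _ =>
        let a := Wc.getD "E" 0
        let b := Wc.getD "W" 0
        let c := Wc.getD "S" 0
        let e := Wc.getD "N" 0
        (((Wc.insert "N" a).insert "S" b).insert "E" c).insert "W" e)
      (PySem.Dict.mk w)).items)
  else if d == "F" then
    (((List.range v.toNat).foldl
      (fun Mc _ =>
        let M1 := Mc.insert "N" (Mc.getD "N" 0 + (PySem.Dict.mk w).getD "N" 0)
        let M2 := M1.insert "S" (M1.getD "S" 0 + (PySem.Dict.mk w).getD "S" 0)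
        let M3 := M2.insert "E" (M2.getD "E" 0 + (PySem.Dict.mk w).getD "E" 0)
        M3.insert "W" (M3.getD "W" 0 + (PySem.Dict.mk w).getD "W" 0))
      (PySem.Dict.mk m)).items, w)
  else (m, w)

-- ===== PORT B =====
-- Literal port of B (Source B): rotation as one permutation write, forward as one multiplication per key.
def mpart2_alt (w : List (String × Int)) (m : List (String × Int)) (d : String) (v : Int) :
    (List (String × Int)) × (List (String × Int)) :=
  if (PySem.Dict.mk w).contains d then
    (m, ((PySem.Dict.mk w).insert d ((PySem.Dict.mk w).getD d 0 + v)).items)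
  else if d == "R" || d == "L" then
    let k : Int := if d == "L" then PySem.Int.mod (-(PySem.Int.mod (PySem.Int.floordiv v 90) 4)) 4
                   else PySem.Int.mod (PySem.Int.floordiv v 90) 4
    let vals := (["N", "E", "S", "W"] : List String).map (fun o => (PySem.Dict.mk w).getD o 0)
    (m, ((PySem.List.enumerate ["N", "E", "S", "W"]).foldl
      (fun Wc p => Wc.insert p.2 (PySem.List.pyGetD vals (PySem.Int.mod (p.1 - k) 4) 0))
      (PySem.Dict.mk w)).items)
  else if d == "F" then
    (((["N", "S", "E", "W"] : List String).foldl
        (fun Mc o => Mc.insert o (Mc.getD o 0 + (PySem.Dict.mk w).getD o 0 * v))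
        (PySem.Dict.mk m)).items, w)
  else (m, w)

-- ===== PRECONDITION & SPEC =====
def pvHas4 (x : List (String × Int)) : Bool :=
  (PySem.Dict.mk x).contains "N" && (PySem.Dict.mk x).contains "S" &&
  (PySem.Dict.mk x).contains "E" && (PySem.Dict.mk x).contains "W"

-- Pre_ excludes: association lists with duplicate keys (they represent no Python dict, whose keys
-- are unique); rotation ("R"/"L") or forward ("F") calls on dicts missing one of the four compass
-- keys, where B always reads all four keys and raises KeyError while A may return because its loop
-- body never runs; and "F" with negative v — an input the instruction format never produces — where
-- A's no-op (empty range(v)) and B's backward move are equally defensible.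
def Pre_mpart2 (w : List (String × Int)) (m : List (String × Int)) (d : String) (v : Int) : Prop :=
  (w.map Prod.fst).Nodup ∧ (m.map Prod.fst).Nodup ∧
  ((PySem.Dict.mk w).contains d = true ∨
   ((d = "R" ∨ d = "L") ∧ pvHas4 w = true) ∨
   (d = "F" ∧ 0 ≤ v ∧ pvHas4 w = true ∧ pvHas4 m = true) ∨
   (d ≠ "R" ∧ d ≠ "L" ∧ d ≠ "F"))
instance (w : List (String × Int)) (m : List (String × Int)) (d : String) (v : Int) : Decidable (Pre_mpart2 w m d v) := by unfold Pre_mpart2; infer_instance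

def pvWitness_mpart2 : (List (String × Int)) × (List (String × Int)) × String × Int :=
  ([("N", 10), ("S", 0), ("E", 1), ("W", 0)], [("N", 3), ("S", 0), ("E", 0), ("W", 0)], "F", 2)

def Spec_mpart2 (w : List (String × Int)) (m : List (String × Int)) (d : String) (v : Int) (out : (List (String × Int)) × (List (String × Int))) : Prop := out = mpart2_alt w m d v
instance (w : List (String × Int)) (m : List (String × Int)) (d : String) (v : Int) (out : (List (String × Int)) × (List (String × Int))) : Decidable (Spec_mpart2 w m d v out) := by unfold Spec_mpart2; infer_instance

-- ===== CLAIM (what is proved, stated in full; the proofs are below) =====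
def Claim_equal_mpart2 : Prop := ∀ (w : List (String × Int)) (m : List (String × Int)) (d : String) (v : Int), Dom_mpart2 w m d v → Pre_mpart2 w m d v → Spec_mpart2 w m d v (mpart2 w m d v)

-- ===== LEMMAS AND PROOFS =====

-- the pointwise effect of overwriting the four compass keys on an items list
def pvUpd4 (a b c e : Int) (p : String × Int) : String × Int :=
  if p.1 = "N" then ("N", a) else if p.1 = "S" then ("S", b)
  else if p.1 = "E" then ("E", c) else if p.1 = "W" then ("W", e) else p

theorem pvUpd4_upd4 (a b c e a' b' c' e' : Int) (p : String × Int) :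
    pvUpd4 a' b' c' e' (pvUpd4 a b c e p) = pvUpd4 a' b' c' e' p := by
  by_cases h1 : p.1 = "N" <;> by_cases h2 : p.1 = "S" <;> by_cases h3 : p.1 = "E" <;>
    by_cases h4 : p.1 = "W" <;> simp_all [pvUpd4]

theorem pvItemsNSEW (D : PySem.Dict String Int)
    (hN : D.contains "N" = true) (hS : D.contains "S" = true)
    (hE : D.contains "E" = true) (hW : D.contains "W" = true) (a b c e : Int) :
    ((((D.insert "N" a).insert "S" b).insert "E" c).insert "W" e).items
      = D.items.map (pvUpd4 a b c e) := by
  rw [PySem.Dict.items_insert_of_contains _ _ (by simp [PySem.Dict.contains_insert, hW]),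
      PySem.Dict.items_insert_of_contains _ _ (by simp [PySem.Dict.contains_insert, hE]),
      PySem.Dict.items_insert_of_contains _ _ (by simp [PySem.Dict.contains_insert, hS]),
      PySem.Dict.items_insert_of_contains _ _ hN,
      List.map_map, List.map_map, List.map_map]
  apply List.map_congr_left
  intro p _
  by_cases h1 : p.1 = "N" <;> by_cases h2 : p.1 = "S" <;> by_cases h3 : p.1 = "E" <;>
    by_cases h4 : p.1 = "W" <;> simp_all [pvUpd4, Function.comp]

theorem pvItemsNESW (D : PySem.Dict String Int)
    (hN : D.contains "N" = true) (hS : D.contains "S" = true)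
    (hE : D.contains "E" = true) (hW : D.contains "W" = true) (a b c e : Int) :
    ((((D.insert "N" a).insert "E" c).insert "S" b).insert "W" e).items
      = D.items.map (pvUpd4 a b c e) := by
  rw [PySem.Dict.items_insert_of_contains _ _ (by simp [PySem.Dict.contains_insert, hW]),
      PySem.Dict.items_insert_of_contains _ _ (by simp [PySem.Dict.contains_insert, hS]),
      PySem.Dict.items_insert_of_contains _ _ (by simp [PySem.Dict.contains_insert, hE]),
      PySem.Dict.items_insert_of_contains _ _ hN,
      List.map_map, List.map_map, List.map_map]
  apply List.map_congr_left
  intro p _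
  by_cases h1 : p.1 = "N" <;> by_cases h2 : p.1 = "S" <;> by_cases h3 : p.1 = "E" <;>
    by_cases h4 : p.1 = "W" <;> simp_all [pvUpd4, Function.comp]

-- writing back each compass key's own current value changes nothing (keys unique)
theorem pvMapUpd4_id (D : PySem.Dict String Int) (hnd : D.keys.Nodup) :
    D.items.map (pvUpd4 (D.getD "N" 0) (D.getD "S" 0) (D.getD "E" 0) (D.getD "W" 0))
      = D.items := by
  conv_rhs => rw [← List.map_id D.items]
  apply List.map_congr_left
  rintro ⟨p1, p2⟩ hp
  by_cases h1 : p1 = "N"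
  · subst h1; simp [pvUpd4, PySem.Dict.getD_of_mem_items D hp hnd]
  · by_cases h2 : p1 = "S"
    · subst h2; simp [pvUpd4, PySem.Dict.getD_of_mem_items D hp hnd]
    · by_cases h3 : p1 = "E"
      · subst h3; simp [pvUpd4, PySem.Dict.getD_of_mem_items D hp hnd]
      · by_cases h4 : p1 = "W"
        · subst h4; simp [pvUpd4, PySem.Dict.getD_of_mem_items D hp hnd]
        · simp [pvUpd4, h1, h2, h3, h4]

theorem pvContainsNSEW (D : PySem.Dict String Int) (x : String) (hx : D.contains x = true)
    (a b c e : Int) :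
    ((((D.insert "N" a).insert "S" b).insert "E" c).insert "W" e).contains x = true := by
  simp [PySem.Dict.contains_insert, hx]

theorem pvGetDNSEW (D : PySem.Dict String Int) (a b c e : Int) (x : String) :
    ((((D.insert "N" a).insert "S" b).insert "E" c).insert "W" e).getD x 0 =
      if x = "W" then e else if x = "E" then c else if x = "S" then b
      else if x = "N" then a else D.getD x 0 := by
  simp [PySem.Dict.getD_insert]

theorem pvCollapse (D : PySem.Dict String Int)
    (hN : D.contains "N" = true) (hS : D.contains "S" = true)
    (hE : D.contains "E" = true) (hW : D.contains "W" = true) (a b c e a' b' c' e' : Int) :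
    (((((((D.insert "N" a).insert "S" b).insert "E" c).insert "W" e).insert
        "N" a').insert "S" b').insert "E" c').insert "W" e'
      = (((D.insert "N" a').insert "S" b').insert "E" c').insert "W" e' := by
  apply PySem.Dict.ext
  rw [pvItemsNSEW _ (pvContainsNSEW D _ hN a b c e) (pvContainsNSEW D _ hS a b c e)
        (pvContainsNSEW D _ hE a b c e) (pvContainsNSEW D _ hW a b c e),
      pvItemsNSEW _ hN hS hE hW, pvItemsNSEW _ hN hS hE hW, List.map_map]
  apply List.map_congr_left
  intro p _
  exact pvUpd4_upd4 _ _ _ _ _ _ _ _ _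

theorem pvFfold (M : PySem.Dict String Int)
    (hn : M.contains "N" = true) (hs : M.contains "S" = true)
    (he : M.contains "E" = true) (hw : M.contains "W" = true)
    (wN wS wE wW : Int) (t : Nat) :
    List.foldl (fun Mc (_ : Nat) =>
        (((Mc.insert "N" (Mc.getD "N" 0 + wN)).insert "S" (Mc.getD "S" 0 + wS)).insert
          "E" (Mc.getD "E" 0 + wE)).insert "W" (Mc.getD "W" 0 + wW)) M (List.range (t + 1))
      = (((M.insert "N" (M.getD "N" 0 + wN * (t + 1))).insert
            "S" (M.getD "S" 0 + wS * (t + 1))).insert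
            "E" (M.getD "E" 0 + wE * (t + 1))).insert "W" (M.getD "W" 0 + wW * (t + 1)) := by
  induction t with
  | zero => norm_num
  | succ t ih =>
    rw [List.range_succ, List.foldl_append, ih]
    simp only [List.foldl_cons, List.foldl_nil]
    rw [pvGetDNSEW, pvGetDNSEW, pvGetDNSEW, pvGetDNSEW, pvCollapse _ hn hs he hw]
    simp only [if_neg (show ("N":String) ≠ "W" by decide), if_neg (show ("N":String) ≠ "E" by decide),
      if_neg (show ("N":String) ≠ "S" by decide), if_neg (show ("S":String) ≠ "W" by decide),
      if_neg (show ("S":String) ≠ "E" by decide), if_neg (show ("E":String) ≠ "W" by decide)]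
    push_cast
    ring_nf

-- ===== VERDICT =====
set_option maxHeartbeats 1000000 in
theorem mpart2_spec : Claim_equal_mpart2 := by
  intro w m d v _ hpre
  obtain ⟨hndw, hndm, hpre⟩ := hpre
  have hkw : (PySem.Dict.mk w).keys.Nodup := hndw
  have hkm : (PySem.Dict.mk m).keys.Nodup := hndm
  show mpart2 w m d v = mpart2_alt w m d v
  by_cases hc : (PySem.Dict.mk w).contains d = true
  · simp [mpart2, mpart2_alt, hc]
  · have hc' : (PySem.Dict.mk w).contains d = false := by
      simp only [Bool.not_eq_true] at hc
      exact hc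
    have hpre' : ((d = "R" ∨ d = "L") ∧ pvHas4 w = true) ∨
        (d = "F" ∧ 0 ≤ v ∧ pvHas4 w = true ∧ pvHas4 m = true) ∨
        (d ≠ "R" ∧ d ≠ "L" ∧ d ≠ "F") := by
      rcases hpre with h | h | h | h
      · exact absurd h hc
      · exact Or.inl h
      · exact Or.inr (Or.inl h)
      · exact Or.inr (Or.inr h)
    by_cases hRL : d = "R" ∨ d = "L"
    · have h4 : pvHas4 w = true := by
        rcases hpre' with ⟨_, h⟩ | ⟨h, _⟩ | ⟨h1, h2, _⟩
        · exact h
        · rcases hRL with h' | h' <;> simp [h'] at h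
        · rcases hRL with h' | h' <;> simp [h'] at h1 h2
      simp only [pvHas4, Bool.and_eq_true] at h4
      obtain ⟨⟨⟨hn, hs⟩, he⟩, hww⟩ := h4
      have hb : 0 ≤ PySem.Int.mod (PySem.Int.floordiv v 90) 4 :=
        PySem.Int.mod_nonneg _ (by norm_num)
      have hb' : PySem.Int.mod (PySem.Int.floordiv v 90) 4 < 4 :=
        PySem.Int.mod_lt _ (by norm_num)
      have hK : PySem.Int.mod (PySem.Int.floordiv v 90) 4 = 0 ∨
          PySem.Int.mod (PySem.Int.floordiv v 90) 4 = 1 ∨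
          PySem.Int.mod (PySem.Int.floordiv v 90) 4 = 2 ∨
          PySem.Int.mod (PySem.Int.floordiv v 90) 4 = 3 := by omega
      rcases hRL with hR | hL
      all_goals subst_vars
      all_goals rcases hK with hK | hK | hK | hK
      all_goals simp only [mpart2, mpart2_alt, hc', hK]
      all_goals norm_num [PySem.List.enumerate]
      all_goals try simp only [if_neg (show ¬("R" : String) = "L" by decide)]
      all_goals try simp only [if_neg (show ¬("L" : String) = "R" by decide)]
      all_goals try norm_num [PySem.List.pyGetD, PySem.List.pyGet?, PySem.List.pyIdx?]
      all_goals try simp only [show Int.toNat 3 = 3 from rfl, show Int.toNat 2 = 2 from rfl,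
        show Int.toNat 1 = 1 from rfl, show Int.toNat 0 = 0 from rfl,
        List.getElem_cons_succ, List.getElem_cons_zero]
      all_goals try simp only [show List.range 2 = [0, 1] from by decide,
        show List.range 3 = [0, 1, 2] from by decide, List.foldl_cons, List.foldl_nil]
      all_goals try simp only [PySem.Dict.getD_insert,
        if_neg (show ("N" : String) ≠ "W" by decide), if_neg (show ("N" : String) ≠ "E" by decide),
        if_neg (show ("N" : String) ≠ "S" by decide), if_neg (show ("S" : String) ≠ "W" by decide),
        if_neg (show ("S" : String) ≠ "E" by decide), if_neg (show ("E" : String) ≠ "W" by decide),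
        if_neg (show ("W" : String) ≠ "N" by decide), if_neg (show ("W" : String) ≠ "E" by decide),
        if_neg (show ("W" : String) ≠ "S" by decide), if_neg (show ("E" : String) ≠ "N" by decide),
        if_neg (show ("E" : String) ≠ "S" by decide), if_neg (show ("S" : String) ≠ "N" by decide),
        if_pos (rfl : ("N" : String) = "N"), if_pos (rfl : ("S" : String) = "S"),
        if_pos (rfl : ("E" : String) = "E"), if_pos (rfl : ("W" : String) = "W")]
      -- k = 0 (R): identity permutation
      · rw [pvItemsNESW _ hn hs he hww, pvMapUpd4_id _ hkw]
      -- k = 1 (R)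
      · rw [pvItemsNSEW _ hn hs he hww, pvItemsNESW _ hn hs he hww]
      -- k = 2 (R)
      · rw [pvItemsNSEW _ (pvContainsNSEW _ _ hn _ _ _ _) (pvContainsNSEW _ _ hs _ _ _ _)
              (pvContainsNSEW _ _ he _ _ _ _) (pvContainsNSEW _ _ hww _ _ _ _),
            pvItemsNSEW _ hn hs he hww, pvItemsNESW _ hn hs he hww, List.map_map]
        refine List.map_congr_left fun p _ => ?_
        simp only [Function.comp_apply, pvUpd4_upd4]
        norm_num
      -- k = 3 (R)
      · rw [pvItemsNSEW _
              (pvContainsNSEW _ _ (pvContainsNSEW _ _ hn _ _ _ _) _ _ _ _)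
              (pvContainsNSEW _ _ (pvContainsNSEW _ _ hs _ _ _ _) _ _ _ _)
              (pvContainsNSEW _ _ (pvContainsNSEW _ _ he _ _ _ _) _ _ _ _)
              (pvContainsNSEW _ _ (pvContainsNSEW _ _ hww _ _ _ _) _ _ _ _),
            pvItemsNSEW _ (pvContainsNSEW _ _ hn _ _ _ _) (pvContainsNSEW _ _ hs _ _ _ _)
              (pvContainsNSEW _ _ he _ _ _ _) (pvContainsNSEW _ _ hww _ _ _ _),
            pvItemsNSEW _ hn hs he hww, pvItemsNESW _ hn hs he hww,
            List.map_map, List.map_map]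
        refine List.map_congr_left fun p _ => ?_
        simp only [Function.comp_apply, pvUpd4_upd4]
        norm_num
      -- k = 0 (L)
      · rw [pvItemsNESW _ hn hs he hww, pvMapUpd4_id _ hkw]
      -- k = 1 (L)
      · rw [pvItemsNSEW _ hn hs he hww, pvItemsNESW _ hn hs he hww]
      -- k = 2 (L)
      · rw [pvItemsNSEW _ (pvContainsNSEW _ _ hn _ _ _ _) (pvContainsNSEW _ _ hs _ _ _ _)
              (pvContainsNSEW _ _ he _ _ _ _) (pvContainsNSEW _ _ hww _ _ _ _),
            pvItemsNSEW _ hn hs he hww, pvItemsNESW _ hn hs he hww, List.map_map]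
        refine List.map_congr_left fun p _ => ?_
        simp only [Function.comp_apply, pvUpd4_upd4]
        norm_num
      -- k = 3 (L)
      · rw [pvItemsNSEW _
              (pvContainsNSEW _ _ (pvContainsNSEW _ _ hn _ _ _ _) _ _ _ _)
              (pvContainsNSEW _ _ (pvContainsNSEW _ _ hs _ _ _ _) _ _ _ _)
              (pvContainsNSEW _ _ (pvContainsNSEW _ _ he _ _ _ _) _ _ _ _)
              (pvContainsNSEW _ _ (pvContainsNSEW _ _ hww _ _ _ _) _ _ _ _),
            pvItemsNSEW _ (pvContainsNSEW _ _ hn _ _ _ _) (pvContainsNSEW _ _ hs _ _ _ _)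
              (pvContainsNSEW _ _ he _ _ _ _) (pvContainsNSEW _ _ hww _ _ _ _),
            pvItemsNSEW _ hn hs he hww, pvItemsNESW _ hn hs he hww,
            List.map_map, List.map_map]
        refine List.map_congr_left fun p _ => ?_
        simp only [Function.comp_apply, pvUpd4_upd4]
        norm_num
    · push_neg at hRL
      obtain ⟨hR, hL⟩ := hRL
      by_cases hF : d = "F"
      · subst hF
        have hkF : 0 ≤ v ∧ pvHas4 w = true ∧ pvHas4 m = true := by
          rcases hpre' with ⟨h, _⟩ | ⟨_, h⟩ | ⟨_, _, h⟩
          · rcases h with h | h <;> simp at h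
          · exact h
          · simp at h
        obtain ⟨hv, h4w, h4m⟩ := hkF
        simp only [pvHas4, Bool.and_eq_true] at h4w h4m
        obtain ⟨⟨⟨hwn, hws⟩, hwe⟩, hwW⟩ := h4w
        obtain ⟨⟨⟨hmn, hms⟩, hme⟩, hmW⟩ := h4m
        simp only [mpart2, mpart2_alt, hc']
        norm_num
        try simp only [if_neg (show ¬("F" : String) = "R" by decide),
          if_neg (show ¬("F" : String) = "L" by decide),
          if_neg (show ¬(("F" : String) = "R" ∨ ("F" : String) = "L") by decide)]
        try simp only [List.foldl_cons, List.foldl_nil]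
        try simp only [PySem.Dict.getD_insert,
          if_neg (show ("N" : String) ≠ "W" by decide), if_neg (show ("N" : String) ≠ "E" by decide),
          if_neg (show ("N" : String) ≠ "S" by decide), if_neg (show ("S" : String) ≠ "W" by decide),
          if_neg (show ("S" : String) ≠ "E" by decide), if_neg (show ("E" : String) ≠ "W" by decide),
          if_neg (show ("W" : String) ≠ "N" by decide), if_neg (show ("W" : String) ≠ "E" by decide),
          if_neg (show ("W" : String) ≠ "S" by decide), if_neg (show ("E" : String) ≠ "N" by decide),
          if_neg (show ("E" : String) ≠ "S" by decide), if_neg (show ("S" : String) ≠ "N" by decide),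
          if_pos (rfl : ("N" : String) = "N"), if_pos (rfl : ("S" : String) = "S"),
          if_pos (rfl : ("E" : String) = "E"), if_pos (rfl : ("W" : String) = "W")]
        by_cases hv0 : v = 0
        · subst hv0
          simp only [mul_zero, add_zero, Int.toNat_zero, List.range_zero, List.foldl_nil]
          rw [pvItemsNSEW _ hmn hms hme hmW, pvMapUpd4_id _ hkm]
        · obtain ⟨t, ht⟩ : ∃ t, v.toNat = t + 1 := ⟨v.toNat - 1, by omega⟩
          rw [ht, pvFfold _ hmn hms hme hmW]
          have hcast : ((t : Int) + 1) = v := by omega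
          rw [hcast]
      · simp only [mpart2, mpart2_alt, hc']
        norm_num [hR, hL, hF]
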